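-- pv_equiv track=rewrite | github.com/CarterT101/PythonChallenges | morepythonchallenges.py | first_word3
-- ===== SOURCE A (Python) =====
-- def first_word3(text: str) -> str:
--     i = 0
--     while i < len(text) and text[i] in ',. ':  # makes sure to skip all of the text that is commas or periods
--         i += 1
--     j = i
--     while j < len(text) and text[j] not in ',. ':  # gets ending point of word
--         j += 1
--     return text[i:j]  # prints the index numbers sliced
-- ===== SOURCE B (Python) =====
-- import re
--
-- def first_word3(text: str) -> str:
--     m = re.search(r'[^,. ]+', text)
--     return m.group() if m else ''
-- ===== Notes on version B (the rewrite author's own statement) =====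
-- stated objective: idiomatic
-- what changed: Replaced A's two hand-written index-scanning while loops with a single regex search for the first run of non-separator characters.
import Mathlib
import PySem

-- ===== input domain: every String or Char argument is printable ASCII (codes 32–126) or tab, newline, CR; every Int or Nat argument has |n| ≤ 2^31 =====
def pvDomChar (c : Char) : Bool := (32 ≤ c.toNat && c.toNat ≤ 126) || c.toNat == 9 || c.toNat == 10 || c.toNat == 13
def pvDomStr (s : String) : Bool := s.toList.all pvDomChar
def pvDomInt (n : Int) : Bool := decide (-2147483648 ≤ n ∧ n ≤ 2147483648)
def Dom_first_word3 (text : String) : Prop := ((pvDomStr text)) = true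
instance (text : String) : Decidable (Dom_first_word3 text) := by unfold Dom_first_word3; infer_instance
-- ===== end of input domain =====

-- B replaces A's two hand-written scanning loops with a single regex search for the first
-- run of non-separator characters (idiomatic rewrite; same cost).

-- ===== PORT A =====
-- `text[i] in ',. '` for the single character text[i]: membership in the chars of ',. '
def pvSepA (c : Char) : Bool := (",. ".toList).contains c

-- first while loop: advance i while text[i] is a separator
def pvLoopI (cs : List Char) (i : Nat) : Nat :=
  if h : i < cs.length then
    if pvSepA cs[i] then pvLoopI cs (i + 1) else i
  else i
termination_by cs.length - i

-- second while loop: advance j while text[j] is NOT a separator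
def pvLoopJ (cs : List Char) (j : Nat) : Nat :=
  if h : j < cs.length then
    if ¬ pvSepA cs[j] then pvLoopJ cs (j + 1) else j
  else j
termination_by cs.length - j

def first_word3 (text : String) : String :=
  let cs := text.toList
  let i := pvLoopI cs 0
  let j := pvLoopJ cs i
  String.ofList (PySem.List.slice cs (some (i : Int)) (some (j : Int)))

-- ===== PORT B =====
-- the regex character class [^,. ]
def pvNonSepB (c : Char) : Bool := !(c == ',' || c == '.' || c == ' ')

-- re.search(r'[^,. ]+', text): the first maximal run of characters matching the class;
-- if there is no match (m is None) the run below is empty and we return ''.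
def first_word3_alt (text : String) : String :=
  String.ofList (((text.toList.dropWhile (fun c => !pvNonSepB c)).takeWhile pvNonSepB))

-- ===== PRECONDITION & SPEC =====
def Spec_first_word3 (text : String) (out : String) : Prop := out = first_word3_alt text
instance (text : String) (out : String) : Decidable (Spec_first_word3 text out) := by unfold Spec_first_word3; infer_instance

-- ===== CLAIM (what is proved, stated in full; the proofs are below) =====
def Claim_equal_first_word3 : Prop := ∀ (text : String), Dom_first_word3 text → Spec_first_word3 text (first_word3 text)

-- ===== LEMMAS AND PROOFS =====

lemma pvSep_eq (c : Char) : pvSepA c = !pvNonSepB c := by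
  have h : ",. ".toList = [',', '.', ' '] := by decide
  simp only [pvSepA, pvNonSepB, h, List.contains_cons, List.contains_nil,
    Bool.not_not, Bool.or_false]
  rw [Bool.or_assoc]

lemma pvLoopI_eq (cs : List Char) (i : Nat) :
    pvLoopI cs i = i + ((cs.drop i).takeWhile pvSepA).length := by
  fun_induction pvLoopI cs i with
  | case1 i h hsep ih =>
      rw [ih]
      rw [List.drop_eq_getElem_cons h, List.takeWhile_cons]
      simp only [hsep, if_true, List.length_cons]
      omega
  | case2 i h hsep =>
      rw [List.drop_eq_getElem_cons h, List.takeWhile_cons]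
      simp only [Bool.not_eq_true] at hsep
      simp [hsep]
  | case3 i h =>
      rw [List.drop_of_length_le (by omega)]
      simp

lemma pvLoopJ_eq (cs : List Char) (j : Nat) :
    pvLoopJ cs j = j + ((cs.drop j).takeWhile (fun c => !pvSepA c)).length := by
  fun_induction pvLoopJ cs j with
  | case1 j h hsep ih =>
      rw [ih]
      rw [List.drop_eq_getElem_cons h, List.takeWhile_cons]
      simp only [Bool.not_eq_true] at hsep
      simp [hsep]
      omega
  | case2 j h hsep =>
      rw [List.drop_eq_getElem_cons h, List.takeWhile_cons]
      simp only [Bool.not_eq_true] at hsep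
      simp [hsep]
  | case3 j h =>
      rw [List.drop_of_length_le (by omega)]
      simp

lemma pv_drop_takeWhile_len {α : Type} (p : α → Bool) (xs : List α) :
    xs.drop (xs.takeWhile p).length = xs.dropWhile p := by
  induction xs with
  | nil => simp
  | cons x xs ih =>
      by_cases h : p x
      · simp [h, ih]
      · simp [h]

lemma pv_take_takeWhile_len {α : Type} (p : α → Bool) (xs : List α) :
    xs.take (xs.takeWhile p).length = xs.takeWhile p := by
  induction xs with
  | nil => simp
  | cons x xs ih =>
      by_cases h : p x
      · simp [h, ih]
      · simp [h]

-- ===== VERDICT (by name: the statement is the Claim_ definition above) =====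
theorem first_word3_spec : Claim_equal_first_word3 := by
  intro text _
  unfold Spec_first_word3 first_word3 first_word3_alt
  simp only []
  generalize text.toList = cs
  rw [pvLoopI_eq, pvLoopJ_eq]
  simp only [List.drop_zero, Nat.zero_add]
  push_cast
  rw [PySem.List.slice_natCast_add]
  rw [pv_drop_takeWhile_len]
  have hdw : cs.dropWhile pvSepA = cs.dropWhile (fun c => !pvNonSepB c) := by
    congr 1; funext c; exact pvSep_eq c
  have htw : ∀ (ys : List Char), ys.takeWhile (fun c => !pvSepA c) = ys.takeWhile pvNonSepB := by
    intro ys; congr 1; funext c; rw [pvSep_eq c]; simp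
  rw [htw, pv_take_takeWhile_len, hdw]
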